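-- pv_equiv track=rewrite | github.com/sp18-interns/python-tutorial | functions/spcalendar/spcalendar.py | odd_days_in_century
-- ===== SOURCE A (Python) =====
-- def is_leap(year):
--     """
--     Description: Given an integer year in the input, it should return a boolean
--     signifying whether the given year is a leap year or not.
--     Input: year (integer)
--     Ouput: boolean (leap or not)
--     """
--     return ((year % 4 == 0) and (year % 100 != 0)) or (year % 400 == 0)
--
-- def odd_days_in_century(century=0):
--     """
--     Description: Given an integer century in input,it should return an integer
--     signifying the total no. of odd days in a century.
--     Input: century(ineger)
--     Output: integer(total no of odd days in a century)
--     """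
--     count_odd = 0
--     count_leap = 0
--     for year in range(century - 100, century):
--         if is_leap(year) == True:
--             count_leap += 1
--     total_days = 36500 + count_leap
--     for day in range(1, total_days + 1):
--         if day % 2 != 0:
--             count_odd += 1
--
--     return count_odd
-- ===== SOURCE B (Python) =====
-- def _leaps_upto(y):
--     # number of leap years <= y (Gregorian rule), valid for negatives via floor division
--     return y // 4 - y // 100 + y // 400
--
-- def odd_days_in_century(century=0):
--     count_leap = _leaps_upto(century - 1) - _leaps_upto(century - 101)
--     total_days = 36500 + count_leap
--     return (total_days + 1) // 2
-- ===== Notes on version B (the rewrite author's own statement) =====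
-- stated objective: simpler
-- what changed: Replaced both fixed-bound loops (100-year leap scan and 36500+ day parity scan) with closed-form arithmetic: leap count via the prefix formula y//4 - y//100 + y//400 and odd-day count via (total_days + 1)//2.
import Mathlib
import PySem

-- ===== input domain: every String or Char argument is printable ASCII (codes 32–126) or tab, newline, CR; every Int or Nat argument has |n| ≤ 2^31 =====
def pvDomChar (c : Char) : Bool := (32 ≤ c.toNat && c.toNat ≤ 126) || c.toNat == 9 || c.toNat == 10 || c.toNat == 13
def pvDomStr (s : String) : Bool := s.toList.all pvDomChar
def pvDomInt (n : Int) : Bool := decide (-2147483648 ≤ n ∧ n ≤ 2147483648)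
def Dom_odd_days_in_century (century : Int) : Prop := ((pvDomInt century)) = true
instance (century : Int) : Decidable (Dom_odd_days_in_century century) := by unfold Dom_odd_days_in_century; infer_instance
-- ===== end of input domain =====

-- B replaces A's two fixed-bound loops with closed-form arithmetic (leap-prefix formula and (n+1)//2); objective: simpler, constant-time.


-- ===== PORT A =====
def is_leap (year : Int) : Bool :=
  ((PySem.Int.mod year 4 == 0) && (PySem.Int.mod year 100 != 0)) || (PySem.Int.mod year 400 == 0)

def odd_days_in_century (century : Int) : Int :=
  let count_leap : Int :=
    (PySem.List.pyRange (century - 100) century 1).foldl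
      (fun acc year => if is_leap year = true then acc + 1 else acc) 0
  let total_days : Int := 36500 + count_leap
  (PySem.List.pyRange 1 (total_days + 1) 1).foldl
    (fun acc day => if PySem.Int.mod day 2 ≠ 0 then acc + 1 else acc) 0

-- ===== PORT B =====
-- number of leap years ≤ y (Gregorian rule), valid for negatives via floor division
def leaps_upto (y : Int) : Int :=
  PySem.Int.floordiv y 4 - PySem.Int.floordiv y 100 + PySem.Int.floordiv y 400

def odd_days_in_century_alt (century : Int) : Int :=
  let count_leap := leaps_upto (century - 1) - leaps_upto (century - 101)
  let total_days := 36500 + count_leap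
  PySem.Int.floordiv (total_days + 1) 2

-- ===== PRECONDITION & SPEC =====
def Spec_odd_days_in_century (century : Int) (out : Int) : Prop := out = odd_days_in_century_alt century
instance (century : Int) (out : Int) : Decidable (Spec_odd_days_in_century century out) := by unfold Spec_odd_days_in_century; infer_instance

-- ===== CLAIM (what is proved, stated in full; the proofs are below) =====
def Claim_equal_odd_days_in_century : Prop := ∀ (century : Int), Dom_odd_days_in_century century → Spec_odd_days_in_century century (odd_days_in_century century)

-- ===== LEMMAS AND PROOFS =====

-- one-year step of the leap prefix-count formula
lemma leaps_upto_step (y : Int) :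
    leaps_upto y - leaps_upto (y - 1) = (if is_leap y = true then 1 else 0) := by
  simp only [leaps_upto, is_leap,
    PySem.Int.floordiv_eq_ediv_of_pos (a := y) (by norm_num : (0:Int) < 4),
    PySem.Int.floordiv_eq_ediv_of_pos (a := y) (by norm_num : (0:Int) < 100),
    PySem.Int.floordiv_eq_ediv_of_pos (a := y) (by norm_num : (0:Int) < 400),
    PySem.Int.floordiv_eq_ediv_of_pos (a := y - 1) (by norm_num : (0:Int) < 4),
    PySem.Int.floordiv_eq_ediv_of_pos (a := y - 1) (by norm_num : (0:Int) < 100),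
    PySem.Int.floordiv_eq_ediv_of_pos (a := y - 1) (by norm_num : (0:Int) < 400),
    PySem.Int.mod_eq_emod_of_pos (a := y) (by norm_num : (0:Int) < 4),
    PySem.Int.mod_eq_emod_of_pos (a := y) (by norm_num : (0:Int) < 100),
    PySem.Int.mod_eq_emod_of_pos (a := y) (by norm_num : (0:Int) < 400),
    Bool.or_eq_true, Bool.and_eq_true, beq_iff_eq, bne_iff_ne, ne_eq]
  split_ifs with h
  · omega
  · omega

-- the leap-counting loop of A equals the difference of prefix counts
lemma leap_loop (n : Nat) : ∀ (a acc : Int),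
    (PySem.List.pyRange a (a + n) 1).foldl
      (fun acc year => if is_leap year = true then acc + 1 else acc) acc
      = acc + (leaps_upto (a + n - 1) - leaps_upto (a - 1)) := by
  induction n with
  | zero => intro a acc; simp [PySem.List.pyRange_one_eq_nil (le_refl a)]
  | succ m ih =>
    intro a acc
    have h1 : a + ((m : Int) + 1) = (a + m) + 1 := by ring
    have h2 : a ≤ a + (m : Int) := by omega
    rw [show ((m + 1 : Nat) : Int) = (m : Int) + 1 by push_cast; ring, h1,
        PySem.List.pyRange_one_succ_right h2, List.foldl_append, ih]
    have hst := leaps_upto_step (a + m)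
    simp only [List.foldl]
    rw [show a + (m : Int) + 1 - 1 = a + m by ring]
    split_ifs with h <;> simp [h] at hst <;> omega

-- the odd-day-counting loop of A equals (n+1)/2
lemma odd_loop (n : Nat) :
    (PySem.List.pyRange 1 ((n : Int) + 1) 1).foldl
      (fun acc day => if PySem.Int.mod day 2 ≠ 0 then acc + 1 else acc) (0 : Int)
      = ((n : Int) + 1) / 2 := by
  induction n with
  | zero => simp [PySem.List.pyRange_one_eq_nil (by norm_num : (1:Int) ≤ 1)]
  | succ m ih =>
    have h2 : (1 : Int) ≤ (m : Int) + 1 := by omega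
    rw [show ((m + 1 : Nat) : Int) + 1 = ((m : Int) + 1) + 1 by push_cast; ring,
        PySem.List.pyRange_one_succ_right h2, List.foldl_append, ih]
    simp only [List.foldl]
    rw [PySem.Int.mod_eq_emod_of_pos (by norm_num : (0:Int) < 2)]
    split_ifs with h <;> omega

-- ===== VERDICT (by name: the statement is the Claim_ definition above) =====
theorem odd_days_in_century_spec : Claim_equal_odd_days_in_century := by
  intro century _
  unfold Spec_odd_days_in_century odd_days_in_century odd_days_in_century_alt
  have hcl : (PySem.List.pyRange (century - 100) century 1).foldl
      (fun acc year => if is_leap year = true then acc + 1 else acc) 0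
      = leaps_upto (century - 1) - leaps_upto (century - 101) := by
    have := leap_loop 100 (century - 100) 0
    rw [show (century - 100) + ((100 : Nat) : Int) = century by push_cast; ring] at this
    rw [this]
    ring_nf
  rw [hcl]
  set cl : Int := leaps_upto (century - 1) - leaps_upto (century - 101) with hdef
  have hnn : 0 ≤ cl := by
    simp only [hdef, leaps_upto,
      PySem.Int.floordiv_eq_ediv_of_pos (a := century - 1) (by norm_num : (0:Int) < 4),
      PySem.Int.floordiv_eq_ediv_of_pos (a := century - 1) (by norm_num : (0:Int) < 100),
      PySem.Int.floordiv_eq_ediv_of_pos (a := century - 1) (by norm_num : (0:Int) < 400),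
      PySem.Int.floordiv_eq_ediv_of_pos (a := century - 101) (by norm_num : (0:Int) < 4),
      PySem.Int.floordiv_eq_ediv_of_pos (a := century - 101) (by norm_num : (0:Int) < 100),
      PySem.Int.floordiv_eq_ediv_of_pos (a := century - 101) (by norm_num : (0:Int) < 400)]
    omega
  have hn : ((36500 + cl).toNat : Int) = 36500 + cl := by omega
  have := odd_loop (36500 + cl).toNat
  rw [hn] at this
  rw [this, PySem.Int.floordiv_eq_ediv_of_pos (by norm_num : (0:Int) < 2)]
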